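-- pv_equiv track=rewrite | github.com/zzsfornlp/zmsp | tasks/zdpar/stat2/helper_decode.py | fdec_left
-- ===== SOURCE A (Python) =====
-- def fdec_left(fun_masks, **kwargs):
--     slen = len(fun_masks)
--     ret = [0] * slen
--     # first deal with the first group
--     widx = 0
--     while widx<slen and fun_masks[widx]:
--         widx += 1
--     if widx>=slen:
--         return ret  # all fun words
--     #
--     prev_content_idx = widx
--     for w in range(widx):
--         ret[w] = prev_content_idx+1
--     #
--     while widx<slen:
--         if fun_masks[widx]:
--             ret[widx] = prev_content_idx+1
--         else:
--             prev_content_idx = widx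
--         widx += 1
--     return ret
-- ===== SOURCE B (Python) =====
-- def fdec_left(fun_masks, **kwargs):
--     n = len(fun_masks)
--     content = [i for i, m in enumerate(fun_masks) if not m]
--     if not content:
--         return [0] * n
--     # output built as concatenation of per-segment chunks
--     out = [content[0] + 1] * content[0]
--     for prev, nxt in zip(content, content[1:] + [n]):
--         out.append(0)
--         out.extend([prev + 1] * (nxt - prev - 1))
--     return out
-- ===== Notes on version B (the rewrite author's own statement) =====
-- stated objective: alternative
-- what changed: Instead of A's in-place array writes driven by a pre-scan loop plus a stateful main loop, B first collects the list of content-word positions and then emits the output as a concatenation of per-segment chunks (leading block, then one chunk per content word using consecutive content positions).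
import Mathlib
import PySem

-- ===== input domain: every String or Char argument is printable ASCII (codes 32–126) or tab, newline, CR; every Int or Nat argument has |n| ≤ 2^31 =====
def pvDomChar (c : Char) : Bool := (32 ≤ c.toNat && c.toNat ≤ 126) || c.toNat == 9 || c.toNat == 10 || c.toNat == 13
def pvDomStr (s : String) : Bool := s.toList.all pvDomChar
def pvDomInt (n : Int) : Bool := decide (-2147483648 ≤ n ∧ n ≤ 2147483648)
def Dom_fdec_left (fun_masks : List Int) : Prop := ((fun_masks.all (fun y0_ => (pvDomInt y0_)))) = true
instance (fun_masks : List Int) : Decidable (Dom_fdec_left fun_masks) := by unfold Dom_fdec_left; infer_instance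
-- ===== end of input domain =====

-- B replaces A's in-place array writes (pre-scan loop + stateful main loop) by collecting the
-- content-word positions once and emitting the output as a concatenation of per-segment chunks.

-- ===== PORT A =====
-- `while widx<slen and fun_masks[widx]: widx += 1` — the loop walks the remaining suffix, widx absolute
def fdecScanGo (rem : List Int) (widx : Nat) : Nat :=
  match rem with
  | [] => widx
  | m :: rest => if m ≠ 0 then fdecScanGo rest (widx + 1) else widx

-- the second `while widx<slen:` loop of A, walking the remaining suffix from widx
def fdecMainGo (rem : List Int) (widx : Nat) (ret : List Int) (prev : Nat) : List Int :=
  match rem with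
  | [] => ret
  | m :: rest =>
    if m ≠ 0 then fdecMainGo rest (widx + 1) (ret.set widx ((prev : Int) + 1)) prev
    else fdecMainGo rest (widx + 1) ret widx

def fdec_left (fun_masks : List Int) : List Int :=
  let slen := fun_masks.length
  let ret := List.replicate slen (0 : Int)
  let widx := fdecScanGo fun_masks 0
  if widx ≥ slen then ret
  else
    let prev_content_idx := widx
    let ret := (List.range widx).foldl (fun r w => r.set w ((prev_content_idx : Int) + 1)) ret
    fdecMainGo (fun_masks.drop widx) widx ret prev_content_idx

-- ===== PORT B =====
def fdec_left_alt (fun_masks : List Int) : List Int :=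
  let n := fun_masks.length
  let content := ((PySem.List.enumerate fun_masks).filter (fun p => p.2 == 0)).map Prod.fst
  match content with
  | [] => List.replicate n (0 : Int)
  | c0 :: _ =>
    (content.zip (content.tail ++ [(n : Int)])).foldl
      (fun out pr => out ++ ((0 : Int) :: List.replicate (pr.2 - pr.1 - 1).toNat (pr.1 + 1)))
      (List.replicate c0.toNat (c0 + 1))

-- ===== PRECONDITION & SPEC =====
def Spec_fdec_left (fun_masks : List Int) (out : List Int) : Prop := out = fdec_left_alt fun_masks
instance (fun_masks : List Int) (out : List Int) : Decidable (Spec_fdec_left fun_masks out) := by unfold Spec_fdec_left; infer_instance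

-- ===== CLAIM (what is proved, stated in full; the proofs are below) =====
def Claim_equal_fdec_left : Prop := ∀ (fun_masks : List Int), Dom_fdec_left fun_masks → Spec_fdec_left fun_masks (fdec_left fun_masks)

-- ===== LEMMAS AND PROOFS =====

-- indices (absolute, offset k) of the zero entries of rem
def fdecZl (rem : List Int) (k : Nat) : List Nat :=
  match rem with
  | [] => []
  | m :: rest => if m = 0 then k :: fdecZl rest (k + 1) else fdecZl rest (k + 1)

-- the tail chunks of B: one chunk per content word, bounded by the next content word (or n)
def fdecChunks (cs : List Nat) (n : Nat) : List Int :=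
  match cs with
  | [] => []
  | c :: cs' => ((0 : Int) :: List.replicate (cs'.headD n - c - 1) ((c : Int) + 1)) ++ fdecChunks cs' n

-- the tail of A's result from position k on, given last content index prev
def fdecBuild (rem : List Int) (prev k : Nat) : List Int :=
  match rem with
  | [] => []
  | m :: rest => if m ≠ 0 then ((prev : Int) + 1) :: fdecBuild rest prev (k + 1)
                 else (0 : Int) :: fdecBuild rest k (k + 1)

theorem fdecScanGo_ge (rem : List Int) : ∀ (i : Nat), i ≤ fdecScanGo rem i := by
  induction rem with
  | nil => intro i; simp [fdecScanGo]
  | cons m rest ih =>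
    intro i
    simp only [fdecScanGo]
    split
    · exact Nat.le_trans (Nat.le_succ i) (ih (i + 1))
    · exact Nat.le_refl i

-- the scan skips only nonzero entries: the zero positions of rem are those of the suffix at the stop index
theorem fdecZl_scan_drop (rem : List Int) :
    ∀ (i : Nat), fdecZl rem i = fdecZl (rem.drop (fdecScanGo rem i - i)) (fdecScanGo rem i) := by
  induction rem with
  | nil => intro i; simp [fdecZl, fdecScanGo]
  | cons m rest ih =>
    intro i
    by_cases hz : m = 0
    · simp [fdecZl, fdecScanGo, hz]
    · have hs : fdecScanGo (m :: rest) i = fdecScanGo rest (i + 1) := by simp [fdecScanGo, hz]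
      have hge : i + 1 ≤ fdecScanGo rest (i + 1) := fdecScanGo_ge ..
      have hd1 : fdecScanGo rest (i + 1) - i = (fdecScanGo rest (i + 1) - (i + 1)) + 1 := by omega
      rw [hs]
      simp only [fdecZl, if_neg hz, hd1, List.drop_succ_cons]
      exact ih (i + 1)

-- at the index where the pre-scan stops (if inside the list), the mask is 0
theorem fdecScanGo_stop (rem : List Int) :
    ∀ (i : Nat), fdecScanGo rem i < i + rem.length →
      rem.drop (fdecScanGo rem i - i) = 0 :: rem.drop (fdecScanGo rem i - i + 1) := by
  induction rem with
  | nil => intro i h; simp [fdecScanGo] at h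
  | cons m rest ih =>
    intro i h
    by_cases hz : m ≠ 0
    · have hs : fdecScanGo (m :: rest) i = fdecScanGo rest (i + 1) := by
        simp [fdecScanGo, hz]
      have hge : i + 1 ≤ fdecScanGo rest (i + 1) := fdecScanGo_ge ..
      rw [hs] at h ⊢
      have h' : fdecScanGo rest (i + 1) < (i + 1) + rest.length := by
        simp at h; omega
      have hd1 : fdecScanGo rest (i + 1) - i = (fdecScanGo rest (i + 1) - (i + 1)) + 1 := by omega
      rw [hd1, List.drop_succ_cons, List.drop_succ_cons]
      exact ih (i + 1) h'
    · simp only [ne_eq, not_not] at hz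
      have hs : fdecScanGo (m :: rest) i = i := by simp [fdecScanGo, hz]
      rw [hs]
      simp [hz]

theorem fdecZl_ge (rem : List Int) : ∀ (k x : Nat), x ∈ fdecZl rem k → k ≤ x := by
  induction rem with
  | nil => intro k x h; simp [fdecZl] at h
  | cons m rest ih =>
    intro k x h
    simp only [fdecZl] at h
    split at h
    · rcases List.mem_cons.mp h with rfl | h'
      · exact le_refl x
      · exact Nat.le_trans (Nat.le_succ k) (ih (k + 1) x h')
    · exact Nat.le_trans (Nat.le_succ k) (ih (k + 1) x h)

theorem fdecZl_headD_ge (rem : List Int) (k d : Nat) (hd : k ≤ d) :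
    k ≤ (fdecZl rem k).headD d := by
  cases h : fdecZl rem k with
  | nil => simpa using hd
  | cons c cs => simpa using fdecZl_ge rem k c (by rw [h]; exact List.mem_cons_self)

-- set at the junction of an append
theorem fdecSet_append (pre : List Int) : ∀ (k : Nat), pre.length = k → ∀ (a : Int) (t : List Int) (v : Int),
    (pre ++ a :: t).set k v = pre ++ v :: t := by
  induction pre with
  | nil => intro k hk a t v; subst hk; simp
  | cons x xs ih =>
    intro k hk a t v
    subst hk
    simp only [List.cons_append, List.length_cons, List.set]
    rw [ih xs.length rfl]

-- A's main loop over a zero-filled suffix builds fdecBuild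
theorem fdecMainGo_build (rem : List Int) :
    ∀ (k : Nat) (pre : List Int) (prev : Nat), pre.length = k →
      fdecMainGo rem k (pre ++ List.replicate rem.length 0) prev
        = pre ++ fdecBuild rem prev k := by
  induction rem with
  | nil => intro k pre prev hk; simp [fdecMainGo, fdecBuild]
  | cons m rest ih =>
    intro k pre prev hk
    by_cases hz : m ≠ 0
    · simp only [fdecMainGo, fdecBuild, if_pos hz, List.length_cons, List.replicate_succ]
      rw [fdecSet_append pre k hk 0 _ ((prev : Int) + 1)]
      have := ih (k + 1) (pre ++ [((prev : Int) + 1)]) prev (by simp [hk])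
      simpa [List.append_assoc] using this
    · simp only [fdecMainGo, fdecBuild, if_neg hz, List.length_cons, List.replicate_succ]
      have := ih (k + 1) (pre ++ [(0 : Int)]) k (by simp [hk])
      rw [← hk]
      simpa [List.append_assoc, hk] using this

-- A's backfill loop turns replicate n 0 into a two-block list
theorem fdecBackfill (n : Nat) (v : Int) :
    ∀ (w : Nat), w ≤ n →
      (List.range w).foldl (fun r i => r.set i v) (List.replicate n (0 : Int))
        = List.replicate w v ++ List.replicate (n - w) 0 := by
  intro w
  induction w with
  | zero => intro _; simp
  | succ w ih =>
    intro hw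
    rw [List.range_succ, List.foldl_append, ih (by omega)]
    have h1 : n - w = (n - (w + 1)) + 1 := by omega
    rw [h1, List.replicate_succ, List.foldl_cons, List.foldl_nil]
    rw [fdecSet_append (List.replicate w v) w (by simp)]
    simp [List.replicate_succ', List.append_assoc]

-- fdecBuild decomposes into a leading replicate block plus per-content chunks
theorem fdecBuild_chunks (rem : List Int) :
    ∀ (k prev : Nat),
      fdecBuild rem prev k
        = List.replicate ((fdecZl rem k).headD (k + rem.length) - k) ((prev : Int) + 1)
            ++ fdecChunks (fdecZl rem k) (k + rem.length) := by
  induction rem with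
  | nil => intro k prev; simp [fdecBuild, fdecZl, fdecChunks]
  | cons m rest ih =>
    intro k prev
    by_cases hz : m ≠ 0
    · have hzl : fdecZl (m :: rest) k = fdecZl rest (k + 1) := by
        simp [fdecZl, hz]
      have hh : k + 1 ≤ (fdecZl rest (k + 1)).headD ((k + 1) + rest.length) :=
        fdecZl_headD_ge rest (k + 1) _ (by omega)
      have hlen : k + (m :: rest).length = (k + 1) + rest.length := by simp; omega
      rw [hzl, hlen]
      simp only [fdecBuild, if_pos hz]
      rw [ih (k + 1) prev]
      have h1 : (fdecZl rest (k + 1)).headD ((k + 1) + rest.length) - k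
          = ((fdecZl rest (k + 1)).headD ((k + 1) + rest.length) - (k + 1)) + 1 := by omega
      rw [h1, List.replicate_succ]
      simp
    · simp only [ne_eq, not_not] at hz
      have hzl : fdecZl (m :: rest) k = k :: fdecZl rest (k + 1) := by
        simp [fdecZl, hz]
      have hlen : k + (m :: rest).length = (k + 1) + rest.length := by simp; omega
      rw [hzl, hlen]
      simp only [fdecBuild, if_neg (by simp [hz] : ¬ m ≠ 0), fdecChunks]
      rw [ih (k + 1) k]
      have h1 : (fdecZl rest (k + 1)).headD (k + 1 + rest.length) - (k + 1)
          = (fdecZl rest (k + 1)).headD (k + 1 + rest.length) - k - 1 := by omega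
      simp only [List.headD_cons, Nat.sub_self, List.replicate_zero, List.nil_append,
        List.cons_append, h1]

-- B's content list is the (Int-cast) list of zero positions
theorem fdecContent_eq (xs : List Int) :
    ∀ (s : Nat), ((PySem.List.enumerate xs (s : Int)).filter (fun p => p.2 == 0)).map Prod.fst
      = (fdecZl xs s).map (fun (c : Nat) => (c : Int)) := by
  induction xs with
  | nil => intro s; simp [PySem.List.enumerate_nil, fdecZl]
  | cons m rest ih =>
    intro s
    rw [PySem.List.enumerate_cons]
    by_cases hz : m = 0
    · simp only [fdecZl, if_pos hz, List.filter_cons]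
      have : ((s : Int), m).2 == 0 := by simp [hz]
      rw [if_pos this]
      simp only [List.map_cons]
      have hs : ((s : Int) + 1) = ((s + 1 : Nat) : Int) := by push_cast; ring
      rw [hs, ih (s + 1)]
    · simp only [fdecZl, if_neg hz, List.filter_cons]
      have : ¬ (((s : Int), m).2 == 0) = true := by simp [hz]
      rw [if_neg this]
      have hs : ((s : Int) + 1) = ((s + 1 : Nat) : Int) := by push_cast; ring
      rw [hs, ih (s + 1)]

-- B's fold over consecutive content pairs appends fdecChunks
theorem fdecFold_chunks (cs : List Nat) :
    ∀ (n : Nat) (out0 : List Int),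
      (((cs.map (fun (c : Nat) => (c : Int))).zip ((cs.map (fun (c : Nat) => (c : Int))).tail ++ [(n : Int)])).foldl
        (fun out pr => out ++ ((0 : Int) :: List.replicate (pr.2 - pr.1 - 1).toNat (pr.1 + 1)))
        out0)
      = out0 ++ fdecChunks cs n := by
  induction cs with
  | nil => intro n out0; simp [fdecChunks]
  | cons c cs' ih =>
    intro n out0
    have hzip : (((c :: cs').map (fun (x : Nat) => (x : Int))).zip
          (((c :: cs').map (fun (x : Nat) => (x : Int))).tail ++ [(n : Int)]))
        = ((c : Int), ((cs'.headD n : Nat) : Int)) ::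
          ((cs'.map (fun (x : Nat) => (x : Int))).zip ((cs'.map (fun (x : Nat) => (x : Int))).tail ++ [(n : Int)])) := by
      cases cs' with
      | nil => simp
      | cons a t => simp
    rw [hzip, List.foldl_cons, ih n]
    have harith : (((cs'.headD n : Nat) : Int) - (c : Int) - 1).toNat = cs'.headD n - c - 1 := by
      omega
    simp only [fdecChunks, harith, List.cons_append, List.append_assoc]

theorem fdec_left_eq_alt (fun_masks : List Int) :
    fdec_left fun_masks = fdec_left_alt fun_masks := by
  unfold fdec_left fdec_left_alt
  simp only []
  have hcontent := fdecContent_eq fun_masks 0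
  have hzd := fdecZl_scan_drop fun_masks 0
  simp only [Nat.sub_zero, Nat.cast_zero] at hzd hcontent
  set n := fun_masks.length with hn
  set w := fdecScanGo fun_masks 0 with hw
  by_cases hlen : w ≥ n
  · -- all-function case: drop w = [], so zl = [] and content = []
    have hdrop : fun_masks.drop w = [] := by
      apply List.drop_eq_nil_of_le; omega
    have hz : fdecZl fun_masks 0 = [] := by rw [hzd, hdrop]; simp [fdecZl]
    rw [hcontent, hz]
    simp [hlen]
  · rw [not_le] at hlen
    have hlt : w < 0 + n := by omega
    have hstop := fdecScanGo_stop fun_masks 0 (by simpa [← hw] using hlt)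
    simp only [Nat.sub_zero] at hstop
    rw [← hw] at hstop
    have hz : fdecZl fun_masks 0 = w :: fdecZl (fun_masks.drop (w + 1)) (w + 1) := by
      rw [hzd, hstop]; simp [fdecZl]
    rw [hcontent, hz]
    rw [if_neg (by omega)]
    simp only [List.map_cons]
    -- A side
    have hdroplen : (fun_masks.drop w).length = n - w := by simp [hn]
    rw [fdecBackfill n _ w (by omega), ← hdroplen]
    rw [fdecMainGo_build (fun_masks.drop w) w (List.replicate w ((w : Int) + 1)) w (by simp)]
    rw [fdecBuild_chunks (fun_masks.drop w) w w]
    -- identify zl of the suffix with the content list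
    have hzsuffix : fdecZl (fun_masks.drop w) w = w :: fdecZl (fun_masks.drop (w + 1)) (w + 1) := by
      rw [hstop]; simp [fdecZl]
    rw [hzsuffix]
    have hlen2 : w + (fun_masks.drop w).length = n := by rw [hdroplen]; omega
    rw [hlen2]
    -- B side
    rw [Int.toNat_natCast]
    have := fdecFold_chunks (w :: fdecZl (fun_masks.drop (w + 1)) (w + 1)) n
      (List.replicate w ((w : Int) + 1))
    simp only [List.map_cons] at this
    rw [this]
    simp [fdecChunks]

-- ===== VERDICT (by name: the statement is the Claim_ definition above) =====
theorem fdec_left_spec : Claim_equal_fdec_left := by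
  intro fun_masks _
  exact fdec_left_eq_alt fun_masks
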